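-- pv_equiv track=rewrite | github.com/Adrit-3001/build_ai | backend/app/utils/session_tools.py | _merge_tiny_points
-- ===== SOURCE A (Python) =====
-- def _merge_tiny_points(points: list[str]) -> list[str]:
--     merged = []
--     buffer = ""
--
--     for p in points:
--         p = p.strip()
--         if not p:
--             continue
--
--         if len(p) < 45:
--             if buffer:
--                 buffer = f"{buffer} {p}"
--             else:
--                 buffer = p
--         else:
--             if buffer:
--                 merged.append(buffer.strip())
--                 buffer = ""
--             merged.append(p)
--
--     if buffer:
--         merged.append(buffer.strip())
--
--     return merged
-- ===== SOURCE B (Python) =====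
-- def _merge_tiny_points(points: list[str]) -> list[str]:
--     cleaned = [q for q in (p.strip() for p in points) if q]
--     merged = []
--     i, n = 0, len(cleaned)
--     while i < n:
--         if len(cleaned[i]) < 45:
--             j = i + 1
--             while j < n and len(cleaned[j]) < 45:
--                 j += 1
--             merged.append(" ".join(cleaned[i:j]))
--             i = j
--         else:
--             merged.append(cleaned[i])
--             i += 1
--     return merged
-- ===== Notes on version B (the rewrite author's own statement) =====
-- stated objective: alternative
-- what changed: Replaces A's single-pass buffer/flush state machine with a two-phase pipeline: first strip-and-filter the points, then scan the cleaned list grouping each maximal run of short (<45 chars) points and emitting it as one ' '.join, long points passing through individually.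
import Mathlib
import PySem

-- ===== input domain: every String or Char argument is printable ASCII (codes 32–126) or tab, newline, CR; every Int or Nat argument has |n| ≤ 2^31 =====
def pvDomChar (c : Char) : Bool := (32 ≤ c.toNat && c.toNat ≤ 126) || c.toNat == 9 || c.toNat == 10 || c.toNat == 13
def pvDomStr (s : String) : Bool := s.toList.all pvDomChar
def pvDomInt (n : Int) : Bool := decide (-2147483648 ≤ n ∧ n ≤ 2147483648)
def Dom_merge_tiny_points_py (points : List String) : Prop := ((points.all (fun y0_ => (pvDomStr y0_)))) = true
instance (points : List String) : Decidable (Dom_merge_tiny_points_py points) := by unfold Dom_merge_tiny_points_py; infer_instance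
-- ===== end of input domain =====

-- B replaces A's buffer/flush state machine with a strip-and-filter pass followed by a
-- run-grouping scan (maximal runs of short points joined at once): alternative decomposition.


-- ===== PORT A =====
-- loop body of A: strip p, skip blanks, accumulate shorts into the buffer, flush on a long point
def pvStepA (st : List String × String) (p0 : String) : List String × String :=
  let p := PySem.Str.strip p0
  if p = "" then st
  else if PySem.Str.len p < 45 then
    if st.2 ≠ "" then (st.1, st.2 ++ " " ++ p) else (st.1, p)
  else
    if st.2 ≠ "" then (st.1 ++ [PySem.Str.strip st.2] ++ [p], "") else (st.1 ++ [p], "")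

-- A's trailing 'if buffer: merged.append(buffer.strip())'
def pvFinish (st : List String × String) : List String :=
  if st.2 ≠ "" then st.1 ++ [PySem.Str.strip st.2] else st.1

def merge_tiny_points_py (points : List String) : List String :=
  pvFinish (points.foldl pvStepA ([], ""))

-- ===== PORT B =====
def pvShort (p : String) : Bool := decide (PySem.Str.len p < 45)

-- cleaned = [q for q in (p.strip() for p in points) if q]
def pvClean (points : List String) : List String :=
  (points.map PySem.Str.strip).filter (fun q => q ≠ "")

-- the scan over `cleaned`: a maximal run of short points becomes one " ".join
def pvChunk : List String → List String
  | [] => []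
  | p :: rest =>
    if pvShort p then
      PySem.Str.join " " (p :: rest.takeWhile pvShort) :: pvChunk (rest.dropWhile pvShort)
    else p :: pvChunk rest
  termination_by l => l.length
  decreasing_by
  · simp only [List.length_cons]
    exact Nat.lt_succ_of_le (List.length_dropWhile_le _ _)
  · simp

def merge_tiny_points_py_alt (points : List String) : List String :=
  pvChunk (pvClean points)

-- ===== PRECONDITION & SPEC =====
def Spec_merge_tiny_points_py (points : List String) (out : List String) : Prop := out = merge_tiny_points_py_alt points
instance (points : List String) (out : List String) : Decidable (Spec_merge_tiny_points_py points out) := by unfold Spec_merge_tiny_points_py; infer_instance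

-- ===== CLAIM (what is proved, stated in full; the proofs are below) =====
def Claim_equal_merge_tiny_points_py : Prop := ∀ (points : List String), Dom_merge_tiny_points_py points → Spec_merge_tiny_points_py points (merge_tiny_points_py points)

-- ===== LEMMAS AND PROOFS =====

-- a char list that is nonempty and has no leading/trailing whitespace (i.e. strip is a no-op on it)
def pvGoodL (l : List Char) : Prop :=
  l ≠ [] ∧ List.dropWhile PySem.Chars.isspace l = l ∧ List.rdropWhile PySem.Chars.isspace l = l

def pvGood (s : String) : Prop := pvGoodL s.toList

theorem pv_strip_eq (l : List Char) :
    PySem.Chars.strip l = List.rdropWhile PySem.Chars.isspace (List.dropWhile PySem.Chars.isspace l) := rfl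

theorem pv_head_not_space {l : List Char} (hne : l ≠ [])
    (h : List.dropWhile PySem.Chars.isspace l = l) :
    ∃ a t, l = a :: t ∧ PySem.Chars.isspace a = false := by
  cases l with
  | nil => exact absurd rfl hne
  | cons a t =>
    refine ⟨a, t, rfl, ?_⟩
    by_contra hb
    have ha : PySem.Chars.isspace a = true := by
      cases hx : PySem.Chars.isspace a with
      | false => exact absurd hx hb
      | true => rfl
    rw [List.dropWhile_cons_of_pos ha] at h
    have h1 := congrArg List.length h
    have h2 := List.length_dropWhile_le PySem.Chars.isspace t
    simp only [List.length_cons] at h1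
    omega

theorem pv_dw_append {L R : List Char} (hne : L ≠ [])
    (h : List.dropWhile PySem.Chars.isspace L = L) :
    List.dropWhile PySem.Chars.isspace (L ++ R) = L ++ R := by
  obtain ⟨a, t, rfl, ha⟩ := pv_head_not_space hne h
  rw [List.cons_append, List.dropWhile_cons_of_neg (by simp [ha])]

theorem pv_dw_prefix {K L : List Char}
    (h : List.dropWhile PySem.Chars.isspace L = L) (hp : K <+: L) :
    List.dropWhile PySem.Chars.isspace K = K := by
  cases K with
  | nil => simp
  | cons a t =>
    obtain ⟨r, hr⟩ := hp
    have hL : L ≠ [] := by rw [← hr]; simp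
    obtain ⟨a', t', he, ha'⟩ := pv_head_not_space hL h
    rw [← hr, List.cons_append] at he
    have : a = a' := (List.cons.injEq _ _ _ _ ▸ he).1
    rw [List.dropWhile_cons_of_neg (by simp [this, ha'])]

theorem pv_rdw_rev {L : List Char} (h : List.rdropWhile PySem.Chars.isspace L = L) :
    List.dropWhile PySem.Chars.isspace L.reverse = L.reverse := by
  have := congrArg List.reverse h
  simpa [List.rdropWhile] using this

theorem pv_rdw_append {L R : List Char} (hne : L ≠ [])
    (h : List.rdropWhile PySem.Chars.isspace L = L) :
    List.rdropWhile PySem.Chars.isspace (R ++ L) = R ++ L := by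
  show (List.dropWhile PySem.Chars.isspace (R ++ L).reverse).reverse = R ++ L
  rw [List.reverse_append, pv_dw_append (by simpa using hne) (pv_rdw_rev h)]
  simp

theorem pvGoodL_append {a b : List Char} (m : List Char)
    (ha : pvGoodL a) (hb : pvGoodL b) : pvGoodL (a ++ m ++ b) := by
  refine ⟨by simp [ha.1], ?_, ?_⟩
  · rw [List.append_assoc, pv_dw_append ha.1 ha.2.1]
  · exact pv_rdw_append hb.1 hb.2.2

theorem pvGoodL_strip {l : List Char} (h : PySem.Chars.strip l ≠ []) :
    pvGoodL (PySem.Chars.strip l) := by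
  refine ⟨h, ?_, ?_⟩
  · rw [pv_strip_eq]
    exact pv_dw_prefix (List.dropWhile_idempotent _ _) (List.rdropWhile_prefix _ _)
  · rw [pv_strip_eq]
    exact List.rdropWhile_idempotent _ _
theorem pv_stripL_self {l : List Char} (h : pvGoodL l) : PySem.Chars.strip l = l := by
  rw [pv_strip_eq, h.2.1, h.2.2]

theorem pv_ne_nil {s : String} (h : s ≠ "") : s.toList ≠ [] := by
  intro hl
  exact h (String.ext (by simp [hl]))

theorem pv_good_ne {s : String} (h : pvGood s) : s ≠ "" := by
  intro he
  apply h.1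
  rw [he]
  rfl

theorem pv_strip_self {s : String} (h : pvGood s) : PySem.Str.strip s = s :=
  String.ext (by rw [PySem.Str.toList_strip, pv_stripL_self h])

theorem pv_good_strip {s : String} (h : PySem.Str.strip s ≠ "") : pvGood (PySem.Str.strip s) := by
  unfold pvGood
  rw [PySem.Str.toList_strip]
  exact pvGoodL_strip (by rw [← PySem.Str.toList_strip]; exact pv_ne_nil h)

theorem pv_strip_strip (p : String) : PySem.Str.strip (PySem.Str.strip p) = PySem.Str.strip p := by
  by_cases h : PySem.Str.strip p = ""
  · rw [h]
    exact String.ext (by rw [PySem.Str.toList_strip]; rfl)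
  · exact pv_strip_self (pv_good_strip h)

theorem pv_goodL_join : ∀ gs : List (List Char), gs ≠ [] → (∀ l ∈ gs, pvGoodL l) →
    pvGoodL (PySem.Chars.join [' '] gs) := by
  intro gs
  induction gs with
  | nil => intro h; exact absurd rfl h
  | cons x t ih =>
    intro _ hall
    cases t with
    | nil =>
      rw [PySem.Chars.join_singleton]
      exact hall x (by simp)
    | cons y t' =>
      rw [PySem.Chars.join_cons_cons]
      exact pvGoodL_append [' '] (hall x (by simp))
        (ih (by simp) (fun l hl => hall l (by simp [hl])))

theorem pv_good_join {g : List String} (hne : g ≠ []) (h : ∀ s ∈ g, pvGood s) :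
    pvGood (PySem.Str.join " " g) := by
  unfold pvGood
  rw [PySem.Str.toList_join]
  exact pv_goodL_join _ (by simpa using hne) (by
    intro l hl
    simp only [List.mem_map] at hl
    obtain ⟨s, hs, rfl⟩ := hl
    exact h s hs)

theorem pv_joinL_append : ∀ (gs : List (List Char)) (x : List Char), gs ≠ [] →
    PySem.Chars.join [' '] (gs ++ [x]) = PySem.Chars.join [' '] gs ++ [' '] ++ x := by
  intro gs
  induction gs with
  | nil => intro x h; exact absurd rfl h
  | cons a t ih =>
    intro x _
    cases t with
    | nil => rw [PySem.Chars.join_singleton]; simp [PySem.Chars.join_cons_cons, PySem.Chars.join_singleton]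
    | cons b t' =>
      have ih' := ih x (by simp)
      simp only [List.cons_append] at ih' ⊢
      rw [PySem.Chars.join_cons_cons, PySem.Chars.join_cons_cons, ih']
      simp [List.append_assoc]

theorem pv_join_append {g : List String} (x : String) (hne : g ≠ []) :
    PySem.Str.join " " (g ++ [x]) = PySem.Str.join " " g ++ " " ++ x := by
  apply String.ext
  rw [PySem.Str.toList_join, String.toList_append, String.toList_append, PySem.Str.toList_join,
    List.map_append]
  have : (" " : String).toList = [' '] := rfl
  rw [this]
  simpa using pv_joinL_append (g.map String.toList) x.toList (by simpa using hne)

theorem pv_join_singleton (x : String) : PySem.Str.join " " [x] = x :=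
  String.ext (by rw [PySem.Str.toList_join]; simp [PySem.Chars.join_singleton])

theorem pv_step_eval (m : List String) (b p : String) (hp : pvGood p) :
    pvStepA (m, b) p =
      if pvShort p then
        (if b ≠ "" then (m, b ++ " " ++ p) else (m, p))
      else
        (if b ≠ "" then (m ++ [PySem.Str.strip b] ++ [p], "") else (m ++ [p], "")) := by
  unfold pvStepA pvShort
  simp only [pv_strip_self hp, if_neg (by simpa using pv_good_ne hp), decide_eq_true_eq]

theorem pv_fold_clean : ∀ (points : List String) (st : List String × String),
    points.foldl pvStepA st = (pvClean points).foldl pvStepA st := by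
  intro points
  induction points with
  | nil => intro st; rfl
  | cons p rest ih =>
    intro st
    have hclean : pvClean (p :: rest) =
        if PySem.Str.strip p ≠ "" then PySem.Str.strip p :: pvClean rest else pvClean rest := by
      unfold pvClean
      simp [List.filter_cons]
    by_cases h : PySem.Str.strip p = ""
    · have hstep : pvStepA st p = st := by unfold pvStepA; simp [h]
      rw [List.foldl_cons, hstep, hclean, if_neg (by simp [h])]
      exact ih st
    · have hstep : pvStepA st p = pvStepA st (PySem.Str.strip p) := by
        unfold pvStepA
        rw [pv_strip_strip]
      rw [List.foldl_cons, hstep, hclean, if_pos h, List.foldl_cons]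
      exact ih _

theorem pvChunk_nil : pvChunk [] = [] := by
  rw [pvChunk.eq_def]

theorem pvChunk_cons_short {p : String} {rest : List String} (h : pvShort p = true) :
    pvChunk (p :: rest) =
      PySem.Str.join " " (p :: rest.takeWhile pvShort) :: pvChunk (rest.dropWhile pvShort) := by
  rw [pvChunk.eq_def]
  simp [h]

theorem pvChunk_cons_long {p : String} {rest : List String} (h : pvShort p = false) :
    pvChunk (p :: rest) = p :: pvChunk rest := by
  rw [pvChunk.eq_def]
  simp [h]

theorem pv_main : ∀ l : List String, (∀ s ∈ l, pvGood s) →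
    (∀ merged, pvFinish (l.foldl pvStepA (merged, "")) = merged ++ pvChunk l) ∧
    (∀ merged (g : List String), g ≠ [] → (∀ s ∈ g, pvGood s) →
       pvFinish (l.foldl pvStepA (merged, PySem.Str.join " " g)) =
         merged ++ (PySem.Str.join " " (g ++ l.takeWhile pvShort)) :: pvChunk (l.dropWhile pvShort)) := by
  intro l
  induction l with
  | nil =>
    intro _
    constructor
    · intro merged
      rw [List.foldl_nil, pvChunk_nil]
      simp [pvFinish]
    · intro merged g hg hgood
      have hjg := pv_good_join hg hgood
      have hjne : PySem.Str.join " " g ≠ "" := pv_good_ne hjg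
      rw [List.foldl_nil]
      unfold pvFinish
      rw [if_pos hjne, pv_strip_self hjg]
      rw [List.takeWhile_nil, List.dropWhile_nil, pvChunk_nil, List.append_nil]
  | cons p rest ih =>
    intro hall
    have hp : pvGood p := hall p (by simp)
    have hrest : ∀ s ∈ rest, pvGood s := fun s hs => hall s (by simp [hs])
    obtain ⟨ih1, ih2⟩ := ih hrest
    constructor
    · intro merged
      rw [List.foldl_cons, pv_step_eval merged "" p hp]
      by_cases hs : pvShort p
      · rw [if_pos hs, if_neg (by simp)]
        have := ih2 merged [p] (by simp) (by simpa using hp)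
        rw [pv_join_singleton] at this
        rw [this, pvChunk_cons_short hs]
        simp
      · rw [if_neg hs, if_neg (by simp)]
        rw [ih1 (merged ++ [p])]
        rw [pvChunk_cons_long (by simpa using hs)]
        simp
    · intro merged g hg hgood
      have hjg : pvGood (PySem.Str.join " " g) := pv_good_join hg hgood
      rw [List.foldl_cons, pv_step_eval merged _ p hp, ]
      by_cases hs : pvShort p
      · rw [if_pos hs, if_pos (pv_good_ne hjg), ← pv_join_append p hg]
        rw [ih2 merged (g ++ [p]) (by simp) (by
          intro s hsm
          rcases List.mem_append.mp hsm with h1 | h1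
          · exact hgood s h1
          · simpa [List.mem_singleton.mp h1] using hp)]
        rw [List.takeWhile_cons_of_pos hs, List.dropWhile_cons_of_pos hs]
        simp
      · rw [if_neg hs, if_pos (pv_good_ne hjg), pv_strip_self hjg]
        rw [ih1 (merged ++ [PySem.Str.join " " g] ++ [p])]
        rw [List.takeWhile_cons_of_neg hs, List.dropWhile_cons_of_neg hs]
        rw [pvChunk_cons_long (by simpa using hs)]
        simp

theorem pv_clean_good (points : List String) : ∀ s ∈ pvClean points, pvGood s := by
  intro s hs
  unfold pvClean at hs
  rw [List.mem_filter] at hs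
  obtain ⟨hmem, hne⟩ := hs
  rw [List.mem_map] at hmem
  obtain ⟨p0, _, rfl⟩ := hmem
  exact pv_good_strip (by simpa using hne)

-- ===== VERDICT (by name: the statement is the Claim_ definition above) =====
theorem merge_tiny_points_py_spec : Claim_equal_merge_tiny_points_py := by
  intro points _
  show merge_tiny_points_py points = merge_tiny_points_py_alt points
  unfold merge_tiny_points_py merge_tiny_points_py_alt
  rw [pv_fold_clean]
  simpa using (pv_main (pvClean points) (pv_clean_good points)).1 []
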